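-- pv_equiv track=rewrite | github.com/upgrace-in/wild | fire_alert_app/views.py | check_for_the_shortest_distance
-- ===== SOURCE A (Python) =====
-- def check_for_the_shortest_distance(arr):
--     min = arr[0][0]
--     ref = arr[0][1]
--     for i in range(0, len(arr)):
--         if(arr[i][0] < min):
--             min = arr[i][0]
--             ref = arr[i][1]
--     return ref
-- ===== SOURCE B (Python) =====
-- def check_for_the_shortest_distance(arr):
--     return sorted(arr, key=lambda p: p[0])[0][1]
-- ===== Notes on version B (the rewrite author's own statement) =====
-- stated objective: simpler
-- what changed: Replaces the explicit min-tracking scan with a stable sort on the first component and returns the ref of the first sorted element; stability preserves A's first-minimum tie-breaking.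
import Mathlib
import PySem

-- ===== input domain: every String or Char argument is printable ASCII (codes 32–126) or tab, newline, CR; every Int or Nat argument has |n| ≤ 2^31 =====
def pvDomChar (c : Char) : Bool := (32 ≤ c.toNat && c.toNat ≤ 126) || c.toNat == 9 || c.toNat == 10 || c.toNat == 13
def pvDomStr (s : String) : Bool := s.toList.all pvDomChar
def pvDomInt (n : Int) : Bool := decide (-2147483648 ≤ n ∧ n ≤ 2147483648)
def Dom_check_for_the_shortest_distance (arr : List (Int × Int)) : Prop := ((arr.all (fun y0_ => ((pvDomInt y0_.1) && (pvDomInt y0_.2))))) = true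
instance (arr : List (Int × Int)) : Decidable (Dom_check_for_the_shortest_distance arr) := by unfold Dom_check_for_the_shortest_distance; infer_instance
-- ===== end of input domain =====

-- B replaces A's explicit min-tracking index loop with a stable sort on the first
-- component (sorted_arr[0][1]); stability preserves A's first-minimum tie-breaking.


-- ===== PORT A =====
-- Literal port of A: min = arr[0][0]; ref = arr[0][1]; for i in range(0, len(arr)):
-- if arr[i][0] < min: update.  arr[0] on the empty list raises IndexError (excluded
-- by Pre_); inside the loop i is always in range, so arr[i] is pyGetD with a dummy default.
def check_for_the_shortest_distance (arr : List (Int × Int)) : Int :=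
  match arr with
  | [] => 0  -- Python raises IndexError here; excluded by Pre_
  | p :: _ =>
    let st := (PySem.List.pyRange 0 (arr.length : Int) 1).foldl
      (fun (s : Int × Int) i =>
        let q := PySem.List.pyGetD arr i (0, 0)
        if q.1 < s.1 then (q.1, q.2) else s) (p.1, p.2)
    st.2

-- ===== PORT B =====
-- Literal port of B: sorted(arr, key=lambda p: p[0])[0][1]; the [0] on the empty
-- sorted list raises IndexError (excluded by Pre_), so headD's default is never used there.
def check_for_the_shortest_distance_alt (arr : List (Int × Int)) : Int :=
  ((PySem.List.sorted arr (fun p => p.1) false).headD (0, 0)).2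

-- ===== PRECONDITION & SPEC =====
-- Pre_ excludes exactly the empty list, on which both Pythons raise IndexError (arr[0]).
def Pre_check_for_the_shortest_distance (arr : List (Int × Int)) : Prop := arr ≠ []
instance (arr : List (Int × Int)) : Decidable (Pre_check_for_the_shortest_distance arr) := by unfold Pre_check_for_the_shortest_distance; infer_instance
def pvWitness_check_for_the_shortest_distance : (List (Int × Int)) := [(3, 10), (1, 20), (1, 30)]
def Spec_check_for_the_shortest_distance (arr : List (Int × Int)) (out : Int) : Prop := out = check_for_the_shortest_distance_alt arr
instance (arr : List (Int × Int)) (out : Int) : Decidable (Spec_check_for_the_shortest_distance arr out) := by unfold Spec_check_for_the_shortest_distance; infer_instance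

-- ===== CLAIM (what is proved, stated in full; the proofs are below) =====
def Claim_equal_check_for_the_shortest_distance : Prop := ∀ (arr : List (Int × Int)), Dom_check_for_the_shortest_distance arr → Pre_check_for_the_shortest_distance arr → Spec_check_for_the_shortest_distance arr (check_for_the_shortest_distance arr)

-- ===== LEMMAS AND PROOFS =====

-- A's loop step on the tracked (min, ref) state.
def pvStep (s q : Int × Int) : Int × Int := if q.1 < s.1 then q else s

-- One insertion: the head of the result is A's step applied to the old head.
theorem insertBy_head (x y : Int × Int) (ys : List (Int × Int)) :
    PySem.List.insertBy (fun a b : Int × Int => decide (a.1 < b.1)) x (y :: ys)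
      = if x.1 < y.1 then x :: y :: ys else y :: PySem.List.insertBy (fun a b : Int × Int => decide (a.1 < b.1)) x ys := by
  simp [PySem.List.insertBy]

-- Invariant: the head of the insertion-sort accumulator is A's fold over the seen elements.
theorem head_foldl_insertBy (xs : List (Int × Int)) :
    ∀ (y : Int × Int) (ys : List (Int × Int)),
      ((xs.foldl (fun acc x => PySem.List.insertBy (fun a b : Int × Int => decide (a.1 < b.1)) x acc) (y :: ys)).headD (0, 0))
        = xs.foldl pvStep y := by
  induction xs with
  | nil => intro y ys; simp
  | cons x xs ih =>
    intro y ys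
    rw [List.foldl_cons, insertBy_head, List.foldl_cons]
    by_cases h : x.1 < y.1
    · rw [if_pos h]
      rw [ih x (y :: ys)]
      simp only [pvStep, if_pos h]
    · rw [if_neg h]
      rw [ih y (PySem.List.insertBy (fun a b : Int × Int => decide (a.1 < b.1)) x ys)]
      simp only [pvStep, if_neg h]

theorem check_for_the_shortest_distance_spec : Claim_equal_check_for_the_shortest_distance := by
  intro arr _ hpre
  unfold Spec_check_for_the_shortest_distance
  match arr with
  | [] => exact absurd rfl hpre
  | p :: t =>
    have hA : check_for_the_shortest_distance (p :: t)
        = ((p :: t).foldl (fun (s q : Int × Int) => if q.1 < s.1 then (q.1, q.2) else s) (p.1, p.2)).2 := by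
      rw [show check_for_the_shortest_distance (p :: t)
            = ((PySem.List.pyRange 0 (((p :: t).length : Nat) : Int) 1).foldl
                (fun (s : Int × Int) i =>
                  if (PySem.List.pyGetD (p :: t) i ((0 : Int), (0 : Int))).1 < s.1 then
                    ((PySem.List.pyGetD (p :: t) i ((0 : Int), (0 : Int))).1,
                     (PySem.List.pyGetD (p :: t) i ((0 : Int), (0 : Int))).2)
                  else s) (p.1, p.2)).2 from rfl]
      rw [PySem.List.foldl_pyRange_zero_pyGetD' (p :: t) ((0 : Int), (0 : Int))
            (fun (s q : Int × Int) => if q.1 < s.1 then (q.1, q.2) else s) (p.1, p.2)]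
    have hB : check_for_the_shortest_distance_alt (p :: t) = (t.foldl pvStep p).2 := by
      unfold check_for_the_shortest_distance_alt
      simp only [PySem.List.sorted, if_neg (by decide : ¬ (false = true)), List.foldl_cons]
      rw [show PySem.List.insertBy (fun a b : Int × Int => decide (a.1 < b.1)) p [] = [p] from rfl]
      rw [head_foldl_insertBy t p []]
    rw [hA, hB]
    unfold pvStep
    simp
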